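-- pv_equiv track=rewrite | github.com/cozmic72/shaw-spell | src/dictionaries/generate_dictionaries.py | group_definitions_by_pos
-- ===== SOURCE A (Python) =====
-- def group_definitions_by_pos(definitions):
--     """
--     Group definitions by part of speech.
--     Returns list of (pos, definitions) tuples, preserving order.
--     """
--     from collections import OrderedDict
--     pos_groups = OrderedDict()
--
--     for def_data in definitions:
--         pos = def_data['pos']
--         if pos not in pos_groups:
--             pos_groups[pos] = []
--         pos_groups[pos].append(def_data)
--
--     return list(pos_groups.items())
-- ===== SOURCE B (Python) =====
-- def group_definitions_by_pos(definitions):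
--     """
--     Group definitions by part of speech.
--     Returns list of (pos, definitions) tuples, preserving order.
--     """
--     order = []
--     for def_data in definitions:
--         pos = def_data['pos']
--         if pos not in order:
--             order.append(pos)
--     return [(pos, [d for d in definitions if d['pos'] == pos]) for pos in order]
-- ===== Notes on version B (the rewrite author's own statement) =====
-- stated objective: alternative
-- what changed: Replaces the single-pass OrderedDict accumulation with an index-first strategy: one pass collects the distinct pos values in first-seen order, then one filter pass over the whole list per distinct pos builds each group.
import Mathlib
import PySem

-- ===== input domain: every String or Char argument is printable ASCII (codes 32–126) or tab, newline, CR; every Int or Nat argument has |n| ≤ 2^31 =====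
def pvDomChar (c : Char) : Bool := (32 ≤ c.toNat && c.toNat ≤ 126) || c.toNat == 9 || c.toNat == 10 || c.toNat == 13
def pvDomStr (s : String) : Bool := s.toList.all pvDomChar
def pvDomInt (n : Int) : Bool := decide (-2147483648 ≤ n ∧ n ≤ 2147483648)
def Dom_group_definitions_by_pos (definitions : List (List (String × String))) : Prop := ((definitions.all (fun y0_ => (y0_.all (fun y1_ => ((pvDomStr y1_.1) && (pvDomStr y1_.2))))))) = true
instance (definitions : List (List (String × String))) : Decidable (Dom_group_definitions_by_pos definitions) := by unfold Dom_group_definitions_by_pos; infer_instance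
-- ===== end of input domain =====

-- B groups by an index-first strategy (distinct pos order, then one filter per pos) instead of
-- A's single-pass OrderedDict accumulation; same return value, different decomposition.

-- d['pos'] on an association-list dict: first match, none = KeyError (shared key-lookup helper)
def pvPos? (dd : List (String × String)) : Option String := (PySem.Dict.mk dd).get? "pos"

-- ===== PORT A =====
def pvAStep (g : PySem.Dict String (List (List (String × String)))) (dd : List (String × String)) :
    PySem.Dict String (List (List (String × String))) :=
  match pvPos? dd with
  | none => g   -- Python raises KeyError here; excluded by Pre_
  | some pos =>
    let g1 := if g.contains pos then g else g.insert pos []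
    g1.insert pos (g1.getD pos [] ++ [dd])

def group_definitions_by_pos (definitions : List (List (String × String))) :
    List (String × (List (List (String × String)))) :=
  (definitions.foldl pvAStep PySem.Dict.empty).items

-- ===== PORT B =====
def pvOrdStep (o : List String) (dd : List (String × String)) : List String :=
  match pvPos? dd with
  | none => o   -- Python raises KeyError here; excluded by Pre_
  | some p => if p ∈ o then o else o ++ [p]

def group_definitions_by_pos_alt (definitions : List (List (String × String))) :
    List (String × (List (List (String × String)))) :=
  let order := definitions.foldl pvOrdStep []
  order.map (fun p => (p, definitions.filter (fun dd => pvPos? dd == some p)))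

-- ===== PRECONDITION & SPEC =====
-- Pre_ excludes inputs where some definition lacks a "pos" key: there Python A (and Python B) raise KeyError.
def Pre_group_definitions_by_pos (definitions : List (List (String × String))) : Prop :=
  ∀ dd ∈ definitions, "pos" ∈ dd.map Prod.fst
instance (definitions : List (List (String × String))) : Decidable (Pre_group_definitions_by_pos definitions) := by unfold Pre_group_definitions_by_pos; infer_instance

def pvWitness_group_definitions_by_pos : (List (List (String × String))) :=
  [[("pos", "n"), ("text", "a")], [("pos", "v"), ("text", "b")], [("pos", "n"), ("text", "c")]]

def Spec_group_definitions_by_pos (definitions : List (List (String × String))) (out : List (String × (List (List (String × String))))) : Prop := out = group_definitions_by_pos_alt definitions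
instance (definitions : List (List (String × String))) (out : List (String × (List (List (String × String))))) : Decidable (Spec_group_definitions_by_pos definitions out) := by unfold Spec_group_definitions_by_pos; infer_instance

-- ===== CLAIM (what is proved, stated in full; the proofs are below) =====
def Claim_equal_group_definitions_by_pos : Prop := ∀ (definitions : List (List (String × String))), Dom_group_definitions_by_pos definitions → Pre_group_definitions_by_pos definitions → Spec_group_definitions_by_pos definitions (group_definitions_by_pos definitions)

-- ===== LEMMAS AND PROOFS =====

theorem mem_foldl_ordStep (xs : List (List (String × String))) (p : String) :
    p ∈ xs.foldl pvOrdStep [] ↔ ∃ dd ∈ xs, pvPos? dd = some p := by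
  induction xs using List.reverseRecOn with
  | nil => simp
  | append_singleton xs dd ih =>
    rw [List.foldl_append]
    simp only [List.foldl_cons, List.foldl_nil, pvOrdStep]
    cases h : pvPos? dd with
    | none =>
      rw [ih]
      constructor
      · rintro ⟨d, hd, hp⟩; exact ⟨d, by simp [hd], hp⟩
      · rintro ⟨d, hd, hp⟩
        rcases List.mem_append.1 hd with hd | hd
        · exact ⟨d, hd, hp⟩
        · simp at hd; subst hd; rw [h] at hp; exact absurd hp (by simp)
    | some q =>
      by_cases hq : q ∈ xs.foldl pvOrdStep []
      · simp only [hq, if_pos]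
        rw [ih]
        constructor
        · rintro ⟨d, hd, hp⟩; exact ⟨d, by simp [hd], hp⟩
        · rintro ⟨d, hd, hp⟩
          rcases List.mem_append.1 hd with hd | hd
          · exact ⟨d, hd, hp⟩
          · simp at hd; subst hd; rw [h] at hp; simp at hp; subst hp; exact ih.1 hq
      · simp only [hq, if_neg, not_false_iff]
        rw [List.mem_append, ih]
        constructor
        · rintro (⟨d, hd, hp⟩ | hp)
          · exact ⟨d, by simp [hd], hp⟩
          · simp at hp; subst hp; exact ⟨dd, by simp, h⟩
        · rintro ⟨d, hd, hp⟩
          rcases List.mem_append.1 hd with hd | hd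
          · exact Or.inl ⟨d, hd, hp⟩
          · simp at hd; subst hd; rw [h] at hp; simp at hp; simp [hp]

theorem nodup_foldl_ordStep (xs : List (List (String × String))) :
    (xs.foldl pvOrdStep []).Nodup := by
  induction xs using List.reverseRecOn with
  | nil => simp
  | append_singleton xs dd ih =>
    rw [List.foldl_append]
    simp only [List.foldl_cons, List.foldl_nil, pvOrdStep]
    cases h : pvPos? dd with
    | none => exact ih
    | some q =>
      by_cases hq : q ∈ xs.foldl pvOrdStep []
      · simpa [hq] using ih
      · simp only [hq, if_neg, not_false_iff]
        exact List.Nodup.append ih (List.nodup_singleton q) (by simpa using hq)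

theorem items_foldl_aStep (xs : List (List (String × String))) :
    (xs.foldl pvAStep PySem.Dict.empty).items =
      (xs.foldl pvOrdStep []).map (fun p => (p, xs.filter (fun dd => pvPos? dd == some p))) := by
  induction xs using List.reverseRecOn with
  | nil => rfl
  | append_singleton xs dd ih =>
    rw [List.foldl_append, List.foldl_append]
    simp only [List.foldl_cons, List.foldl_nil]
    set g := xs.foldl pvAStep PySem.Dict.empty with hg
    set o := xs.foldl pvOrdStep [] with ho
    have hkeys : g.keys = o := by
      simp only [PySem.Dict.keys, ih, List.map_map]
      exact List.map_id _
    have hnd : g.keys.Nodup := by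
      rw [hkeys]; exact nodup_foldl_ordStep xs
    cases h : pvPos? dd with
    | none =>
      simp only [pvAStep, pvOrdStep, h]
      rw [ih]
      apply List.map_congr_left
      intro p hp
      have hb : (pvPos? dd == some p) = false := by simp [h]
      simp [List.filter_append, hb]
    | some q =>
      have hcont : g.contains q = decide (q ∈ o) := by
        rw [PySem.Dict.contains_eq_decide_mem_keys, hkeys]
      by_cases hq : q ∈ o
      · have hc : g.contains q = true := by rw [hcont]; simpa using hq
        simp only [pvAStep, pvOrdStep, h, hc, if_true, if_pos hq]
        have hmem : (q, xs.filter (fun dd => pvPos? dd == some q)) ∈ g.items := by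
          rw [ih]; exact List.mem_map_of_mem hq
        have hget : g.getD q [] = xs.filter (fun dd => pvPos? dd == some q) :=
          PySem.Dict.getD_of_mem_items g hmem hnd []
        rw [PySem.Dict.items_insert_of_contains g _ hc, ih, hget, List.map_map]
        apply List.map_congr_left
        intro p hp
        by_cases hpq : p = q
        · subst hpq
          simp [List.filter_append, h]
        · have hb1 : (p == q) = false := by simpa using hpq
          have hb2 : (pvPos? dd == some p) = false := by simp [h, Ne.symm hpq]
          simp [List.filter_append, hb2, hpq]
      · have hc : g.contains q = false := by rw [hcont]; simpa using hq
        simp only [pvAStep, pvOrdStep, h, hc, Bool.false_eq_true, if_false, if_neg hq]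
        rw [PySem.Dict.getD_insert_self, PySem.Dict.insert_insert_self,
          PySem.Dict.items_insert_of_not_contains g _ hc, ih, List.map_append]
        congr 1
        · apply List.map_congr_left
          intro p hp
          have hpq : p ≠ q := fun e => hq (e ▸ hp)
          have hb2 : (pvPos? dd == some p) = false := by simp [h, Ne.symm hpq]
          simp [List.filter_append, hb2]
        · have hfil : xs.filter (fun dd => pvPos? dd == some q) = [] := by
            rw [List.filter_eq_nil_iff]
            intro a ha hcontra
            exact hq ((mem_foldl_ordStep xs q).2 ⟨a, ha, by simpa using hcontra⟩)
          simp [List.filter_append, h, hfil]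

-- ===== VERDICT (by name: the statement is the Claim_ definition above) =====
theorem group_definitions_by_pos_spec : Claim_equal_group_definitions_by_pos := by
  intro defs _ _
  unfold Spec_group_definitions_by_pos group_definitions_by_pos group_definitions_by_pos_alt
  exact items_foldl_aStep defs
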